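-- pv_equiv track=rewrite | github.com/jlynnvaccaro/balanced_ideals_scripts | sage/core_facts.py | make_len_hist
-- ===== SOURCE A (Python) =====
-- from collections import defaultdict
--
-- def bruhat_len(s):
--     """Gives the length of the word"""
--     if s=="1":
--         return 0
--     return len(s)
--
-- def make_len_hist(L):
--     """Make a histogram of lengths using defaultdict"""
--     d = defaultdict(int)
--     max_len = 0
--     for x in L:
--         x_len = bruhat_len(x)
--         d[x_len] += 1
--         if x_len > max_len:
--             max_len = x_len
--     return max_len, d
-- ===== SOURCE B (Python) =====
-- from collections import defaultdict
--
-- def bruhat_len(s):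
--     """Gives the length of the word"""
--     if s=="1":
--         return 0
--     return len(s)
--
-- def make_len_hist(L):
--     """Staged passes: map to lengths, dedup the keys, count each key, then take the max of the lengths."""
--     lens = [bruhat_len(x) for x in L]
--     d = defaultdict(int)
--     for k in dict.fromkeys(lens):
--         d[k] = lens.count(k)
--     return max(lens, default=0), d
-- ===== Notes on version B (the rewrite author's own statement) =====
-- stated objective: alternative
-- what changed: B replaces A's single incremental pass (per-element counter update plus running max) by staged passes: map to lengths, dedup the keys in first-occurrence order, count each distinct key with list.count, and take the max as a reduction over the lengths list.
import Mathlib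
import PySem

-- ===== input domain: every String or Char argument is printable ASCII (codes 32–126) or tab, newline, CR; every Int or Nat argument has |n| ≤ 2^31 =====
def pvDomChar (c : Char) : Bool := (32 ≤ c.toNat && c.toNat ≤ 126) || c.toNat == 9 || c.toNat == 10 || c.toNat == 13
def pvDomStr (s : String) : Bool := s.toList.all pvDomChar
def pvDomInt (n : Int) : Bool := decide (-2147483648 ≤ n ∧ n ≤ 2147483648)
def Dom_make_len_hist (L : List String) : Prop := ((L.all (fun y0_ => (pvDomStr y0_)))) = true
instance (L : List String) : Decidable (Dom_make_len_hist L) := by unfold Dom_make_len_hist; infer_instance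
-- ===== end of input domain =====

-- B builds the histogram by staged passes (map lengths, dedup keys, count each key, max over the list) instead of A's single incremental pass; alternative decomposition, not faster.


-- ===== PORT A =====
def bruhat_len (s : String) : Int :=
  if s = "1" then 0 else PySem.Str.len s

def make_len_hist (L : List String) : Int × (List (Int × Int)) :=
  let r := L.foldl
    (fun (st : Int × PySem.Dict Int Int) x =>
      let x_len := bruhat_len x
      let d := st.2.modify x_len 0 (· + 1)
      let max_len := if x_len > st.1 then x_len else st.1
      (max_len, d))
    (0, PySem.Dict.empty)
  (r.1, r.2.items)

-- ===== PORT B =====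
def bruhat_len_alt (s : String) : Int :=
  if s = "1" then 0 else PySem.Str.len s

def make_len_hist_alt (L : List String) : Int × (List (Int × Int)) :=
  let lens := L.map bruhat_len_alt
  let d := (PySem.Set.ofList lens).foldl
    (fun (d : PySem.Dict Int Int) k => d.insert k (lens.count k : Int)) PySem.Dict.empty
  let m := match PySem.List.max? lens (fun y => y) with
    | none => 0
    | some m => m
  (m, d.items)

-- ===== PRECONDITION & SPEC =====
def Spec_make_len_hist (L : List String) (out : Int × (List (Int × Int))) : Prop := out = make_len_hist_alt L
instance (L : List String) (out : Int × (List (Int × Int))) : Decidable (Spec_make_len_hist L out) := by unfold Spec_make_len_hist; infer_instance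

-- ===== CLAIM (what is proved, stated in full; the proofs are below) =====
def Claim_equal_make_len_hist : Prop := ∀ (L : List String), Dom_make_len_hist L → Spec_make_len_hist L (make_len_hist L)

-- ===== LEMMAS AND PROOFS =====

theorem bruhat_len_alt_eq : bruhat_len_alt = bruhat_len := rfl

theorem bruhat_len_nonneg (s : String) : 0 ≤ bruhat_len s := by
  unfold bruhat_len
  split
  · exact le_refl 0
  · simp [PySem.Str.len_eq]

-- A's paired fold splits into the max-fold and the dict-fold
theorem foldA_split (L : List String) (m : Int) (d : PySem.Dict Int Int) :
    L.foldl
      (fun (st : Int × PySem.Dict Int Int) x =>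
        let x_len := bruhat_len x
        let d := st.2.modify x_len 0 (· + 1)
        let max_len := if x_len > st.1 then x_len else st.1
        (max_len, d))
      (m, d)
    = (L.foldl (fun m x => max m (bruhat_len x)) m,
       L.foldl (fun d x => PySem.Dict.modify d (bruhat_len x) 0 (· + 1)) d) := by
  induction L generalizing m d with
  | nil => rfl
  | cons x t ih =>
    simp only [List.foldl_cons, ih]
    have hmax : (if bruhat_len x > m then bruhat_len x else m) = max m (bruhat_len x) := by omega
    rw [hmax]

-- B's fresh-key insert loop produces exactly Counter(lens)'s items
theorem itemsB_eq_counter (lens : List Int) :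
    ((PySem.Set.ofList lens).foldl
      (fun (d : PySem.Dict Int Int) k => d.insert k (lens.count k : Int))
      PySem.Dict.empty).items
    = (PySem.Dict.counter lens).items := by
  rw [PySem.Dict.items_counter]
  have h := PySem.Dict.items_foldl_insert_fresh (l := PySem.Set.ofList lens)
    (k := fun a => a) (v := fun a => (lens.count a : Int)) (d := PySem.Dict.empty)
    (by intro a _; exact PySem.Dict.contains_empty a)
    (by simp [PySem.Set.nodup_ofList])
  simpa using h

-- ===== VERDICT (by name: the statement is the Claim_ definition above) =====
theorem make_len_hist_spec : Claim_equal_make_len_hist := by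
  intro L _
  show make_len_hist L = make_len_hist_alt L
  unfold make_len_hist make_len_hist_alt
  rw [bruhat_len_alt_eq]
  simp only [foldA_split]
  have hdict : L.foldl (fun d x => PySem.Dict.modify d (bruhat_len x) 0 (· + 1))
      PySem.Dict.empty = PySem.Dict.counter (L.map bruhat_len) := by
    rw [PySem.Dict.counter_eq_foldl, List.foldl_map]
  rw [hdict, ← itemsB_eq_counter]
  congr 1
  -- max component: running max from 0 = max? with default 0 (lengths are nonnegative)
  rw [show L.foldl (fun m x => max m (bruhat_len x)) 0
      = (L.map bruhat_len).foldl max 0 from (List.foldl_map ..).symm]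
  cases L with
  | nil => simp [PySem.List.max?]
  | cons s t =>
    simp only [List.map_cons, PySem.List.max?_id_cons, List.foldl_cons]
    rw [max_eq_right (bruhat_len_nonneg s)]
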